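-- pv_equiv track=rewrite | github.com/soijeongg/Baekjoon | 프로그래머스/unrated/181855. 문자열 묶기/문자열 묶기.py | solution
-- ===== SOURCE A (Python) =====
-- def solution(strArr):
--     answer = 0
--     list =[]
--     for i in strArr:
--         list.append(len(i))
--     most_common_value = max(set(list), key = list.count)
--     for i in strArr:
--         if len(i)==most_common_value:
--             answer +=1
--     return answer
-- ===== SOURCE B (Python) =====
-- def solution(strArr):
--     lens = sorted(len(s) for s in strArr)
--     best = 0
--     run = 0
--     prev = None
--     for L in lens:
--         if L == prev:
--             run += 1
--         else:
--             run = 1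
--             prev = L
--         if run > best:
--             best = run
--     return best
-- ===== Notes on version B (the rewrite author's own statement) =====
-- stated objective: alternative
-- what changed: B sorts the lengths once and scans consecutive runs to find the largest run, instead of A's repeated list.count scan over the distinct lengths followed by a second counting pass.
import Mathlib
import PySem

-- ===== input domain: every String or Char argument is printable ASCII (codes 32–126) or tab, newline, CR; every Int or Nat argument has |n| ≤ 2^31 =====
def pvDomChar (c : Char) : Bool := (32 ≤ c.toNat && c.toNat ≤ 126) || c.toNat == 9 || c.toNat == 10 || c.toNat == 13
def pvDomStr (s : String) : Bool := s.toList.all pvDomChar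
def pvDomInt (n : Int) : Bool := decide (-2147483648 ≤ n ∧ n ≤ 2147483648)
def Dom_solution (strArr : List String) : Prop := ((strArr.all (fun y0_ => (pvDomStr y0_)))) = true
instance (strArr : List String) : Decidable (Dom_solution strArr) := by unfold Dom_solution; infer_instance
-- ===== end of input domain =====

-- B replaces A's per-distinct-length list.count scan by sort-the-lengths-then-longest-run (alternative algorithm).

-- ===== PORT A =====
def solution (strArr : List String) : Int :=
  let list := strArr.foldl (fun acc i => acc ++ [PySem.Str.len i]) ([] : List Int)
  match PySem.List.max? (PySem.Set.ofList list) (fun v => PySem.List.count list v) with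
  | none => 0  -- unreachable under Pre_solution: Python's max raises ValueError on the empty set
  | some most_common_value =>
      strArr.foldl (fun answer i => if PySem.Str.len i == most_common_value then answer + 1 else answer) 0

-- ===== PORT B =====
def solution_alt (strArr : List String) : Int :=
  let lens := PySem.List.sorted (strArr.map (fun s => PySem.Str.len s)) (fun x => x) false
  (lens.foldl (fun st L =>
      let run : Int := if some L == st.2.2 then st.2.1 + 1 else 1
      let best : Int := if run > st.1 then run else st.1
      (best, run, some L)) ((0, 0, none) : Int × Int × Option Int)).1

-- ===== PRECONDITION & SPEC =====
-- Pre_ excludes only the empty list, on which Python A raises ValueError (max() of an empty set).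
def Pre_solution (strArr : List String) : Prop := strArr ≠ []
instance (strArr : List String) : Decidable (Pre_solution strArr) := by unfold Pre_solution; infer_instance
def pvWitness_solution : List String := (["a", "bc", "d"])

def Spec_solution (strArr : List String) (out : Int) : Prop := out = solution_alt strArr
instance (strArr : List String) (out : Int) : Decidable (Spec_solution strArr out) := by unfold Spec_solution; infer_instance

-- ===== CLAIM (what is proved, stated in full; the proofs are below) =====
def Claim_equal_solution : Prop := ∀ (strArr : List String), Dom_solution strArr → Pre_solution strArr → Spec_solution strArr (solution strArr)

-- ===== LEMMAS AND PROOFS =====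

-- pvM l = the largest multiplicity of an element of l (0 for []).
def pvM (l : List Int) : Nat := l.foldl (fun m v => max m (List.count v l)) 0

def pvMSpec (l : List Int) (x : Nat) : Prop :=
  (∀ v ∈ l, List.count v l ≤ x) ∧ (x = 0 ∨ ∃ v ∈ l, x = List.count v l)

lemma pvMSpec_unique {l : List Int} {x y : Nat} (hx : pvMSpec l x) (hy : pvMSpec l y) : x = y := by
  rcases hx with ⟨hxu, hxa⟩
  rcases hy with ⟨hyu, hya⟩
  apply Nat.le_antisymm
  · rcases hxa with h0 | ⟨v, hv, hev⟩
    · omega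
    · exact hev ▸ hyu v hv
  · rcases hya with h0 | ⟨v, hv, hev⟩
    · omega
    · exact hev ▸ hxu v hv

lemma pvM_spec (l : List Int) : pvMSpec l (pvM l) := by
  constructor
  · intro v hv
    exact (PySem.List.le_foldl_max_nat l (fun v => List.count v l) 0).2 v hv
  · have hmap : pvM l = (l.map (fun v => List.count v l)).foldl max 0 := by
      simp [pvM, List.foldl_map]
    rcases PySem.List.foldl_max_mem (l.map (fun v => List.count v l)) 0 with h | h
    · left; rw [hmap, h]
    · right
      rw [hmap]
      rcases List.mem_map.mp h with ⟨v, hv, hev⟩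
      exact ⟨v, hv, hev.symm⟩

lemma pvM_eq_of_spec {l : List Int} {x : Nat} (h : pvMSpec l x) : pvM l = x :=
  pvMSpec_unique (pvM_spec l) h

lemma pvM_perm {l l' : List Int} (h : l.Perm l') : pvM l = pvM l' := by
  apply pvM_eq_of_spec
  rcases pvM_spec l' with ⟨hu, ha⟩
  constructor
  · intro v hv
    rw [h.count_eq]
    exact hu v (h.mem_iff.mp hv)
  · rcases ha with h0 | ⟨v, hv, hev⟩
    · left; exact h0
    · right; exact ⟨v, h.mem_iff.mpr hv, by rw [h.count_eq]; exact hev⟩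

lemma count_append_self (l : List Int) (L : Int) :
    List.count L (l ++ [L]) = List.count L l + 1 := by
  simp [List.count_append]

lemma count_append_ne (l : List Int) {v L : Int} (h : ¬ v = L) :
    List.count v (l ++ [L]) = List.count v l := by
  simp [List.count_append, Ne.symm h]

lemma pvM_append_singleton (l : List Int) (L : Int) :
    pvM (l ++ [L]) = max (pvM l) (List.count L l + 1) := by
  apply pvM_eq_of_spec
  constructor
  · intro v hv
    by_cases hvL : v = L
    · subst hvL
      rw [count_append_self]
      omega
    · rw [count_append_ne l hvL]
      have hv' : v ∈ l := by
        rcases List.mem_append.mp hv with h | h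
        · exact h
        · simp at h; exact absurd h hvL
      have := (pvM_spec l).1 v hv'
      omega
  · right
    by_cases hc : pvM l ≤ List.count L l + 1
    · refine ⟨L, by simp, ?_⟩
      rw [count_append_self]
      omega
    · rcases (pvM_spec l).2 with h0 | ⟨v, hv, hev⟩
      · omega
      · have hvL : ¬ v = L := by
          intro hcon; subst hcon; omega
        refine ⟨v, List.mem_append.mpr (Or.inl hv), ?_⟩
        rw [count_append_ne l hvL]
        omega

-- the (run, prev) part of B's loop state after scanning l
def pvAux (l : List Int) : Int × Option Int :=
  match l.getLast? with
  | none => (0, none)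
  | some x => ((List.count x l : Int), some x)

lemma le_of_getLast? {l : List Int} (hp : l.Pairwise (· ≤ ·)) {x : Int}
    (hx : l.getLast? = some x) : ∀ a ∈ l, a ≤ x := by
  rcases List.getLast?_eq_some_iff.mp hx with ⟨l', rfl⟩
  intro a ha
  rcases List.mem_append.mp ha with h | h
  · exact (List.pairwise_append.mp hp).2.2 a h x (by simp)
  · simp at h; omega

-- The run-scan loop of B computes the largest multiplicity of a sorted list.
lemma pvRun_inv (l : List Int) (hp : l.Pairwise (· ≤ ·)) :
    (l.foldl (fun st L =>
      let run : Int := if some L == st.2.2 then st.2.1 + 1 else 1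
      let best : Int := if run > st.1 then run else st.1
      (best, run, some L)) ((0, 0, none) : Int × Int × Option Int))
    = ((pvM l : Int), pvAux l) := by
  induction l using List.reverseRecOn with
  | nil => simp [pvM, pvAux]
  | append_singleton l L ih =>
    have hp' : l.Pairwise (· ≤ ·) := (List.pairwise_append.mp hp).1
    have hcross : ∀ a ∈ l, a ≤ L := by
      intro a ha
      exact (List.pairwise_append.mp hp).2.2 a ha L (by simp)
    have hauxL : pvAux (l ++ [L]) = ((List.count L (l ++ [L]) : Int), some L) := by
      simp [pvAux]
    by_cases hl : l = []
    · subst hl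
      simp only [List.nil_append, List.foldl_cons, List.foldl_nil] at *
      rw [hauxL]
      have h2 : pvM [L] = 1 := by simp [pvM]
      simp [h2]
    · cases hx : l.getLast? with
      | none => exact absurd (List.getLast?_eq_none_iff.mp hx) hl
      | some x =>
        have hauxl : pvAux l = ((List.count x l : Int), some x) := by simp [pvAux, hx]
        rw [List.foldl_append, ih hp', hauxl]
        simp only [List.foldl_cons, List.foldl_nil]
        rw [hauxL]
        have hxmem : x ∈ l := by
          rcases List.getLast?_eq_some_iff.mp hx with ⟨l', rfl⟩
          simp
        by_cases hxL : L = x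
        · subst hxL
          have hc : (some L == some L) = true := by simp
          have hcnt : List.count L (l ++ [L]) = List.count L l + 1 := count_append_self l L
          have hM : pvM (l ++ [L]) = max (pvM l) (List.count L l + 1) := pvM_append_singleton l L
          simp only [hc, if_true]
          split_ifs with hgt <;>
          · rw [Prod.mk.injEq, Prod.mk.injEq]
            refine ⟨?_, ?_, rfl⟩
            · rw [hM]; push_cast at hgt ⊢; omega
            · rw [hcnt]; push_cast; ring
        · have hc : (some L == some x) = false := by simp [hxL]
          have hnotmem : L ∉ l := by
            intro hmem
            have h1 : L ≤ x := le_of_getLast? hp' hx L hmem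
            have h2 : x ≤ L := hcross x hxmem
            exact hxL (le_antisymm h1 h2)
          have hcnt0 : List.count L l = 0 := List.count_eq_zero.mpr hnotmem
          have hcnt : List.count L (l ++ [L]) = 1 := by
            rw [count_append_self, hcnt0]
          have hM : pvM (l ++ [L]) = max (pvM l) 1 := by
            rw [pvM_append_singleton l L, hcnt0]
          simp only [hc, Bool.false_eq_true, if_false]
          split_ifs with hgt <;>
          · rw [Prod.mk.injEq, Prod.mk.injEq]
            refine ⟨?_, ?_, rfl⟩
            · rw [hM]; push_cast at hgt ⊢; omega
            · rw [hcnt]; norm_num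

-- A under Pre_ computes pvM of the length list.
lemma solution_eq_pvM (strArr : List String) (h : strArr ≠ []) :
    solution strArr = (pvM (strArr.map (fun s => PySem.Str.len s)) : Int) := by
  have hfold : strArr.foldl (fun acc i => acc ++ [PySem.Str.len i]) ([] : List Int)
      = strArr.map (fun s => PySem.Str.len s) := by
    rw [PySem.List.foldl_append_singleton_eq_map, List.nil_append]
  have hdef : solution strArr =
      (match PySem.List.max?
          (PySem.Set.ofList (strArr.foldl (fun acc i => acc ++ [PySem.Str.len i]) ([] : List Int)))
          (fun v => PySem.List.count (strArr.foldl (fun acc i => acc ++ [PySem.Str.len i]) ([] : List Int)) v) with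
       | none => 0
       | some most_common_value =>
           strArr.foldl (fun answer i => if PySem.Str.len i == most_common_value then answer + 1 else answer) 0) := rfl
  rw [hdef, hfold]
  have hlne : strArr.map (fun s => PySem.Str.len s) ≠ [] := by simp [h]
  split
  next heq =>
    exfalso
    have hnil := (PySem.List.max?_eq_none_iff _ _).mp heq
    rcases List.exists_mem_of_ne_nil _ hlne with ⟨v, hv⟩
    have hmem := (PySem.Set.mem_ofList (strArr.map (fun s => PySem.Str.len s)) v).mpr hv
    rw [hnil] at hmem
    simp at hmem
  next mcv heq =>
    have hcnt : strArr.foldl (fun answer i => if PySem.Str.len i == mcv then answer + 1 else answer) 0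
        = (List.count mcv (strArr.map (fun s => PySem.Str.len s)) : Int) := by
      rw [PySem.List.foldl_if_add_one]
      simp [List.count, List.countP_map]
      rfl
    rw [hcnt]
    congr 1
    symm
    apply pvM_eq_of_spec
    constructor
    · intro v hv
      have := PySem.List.max?_isMax heq v
        ((PySem.Set.mem_ofList (strArr.map (fun s => PySem.Str.len s)) v).mpr hv)
      simpa [PySem.List.count] using this
    · right
      exact ⟨mcv, (PySem.Set.mem_ofList _ mcv).mp (PySem.List.max?_mem heq), rfl⟩

-- B computes pvM of the length list.
lemma solution_alt_eq_pvM (strArr : List String) :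
    solution_alt strArr = (pvM (strArr.map (fun s => PySem.Str.len s)) : Int) := by
  have hdef : solution_alt strArr =
      ((PySem.List.sorted (strArr.map (fun s => PySem.Str.len s)) (fun x => x) false).foldl
        (fun st L =>
          let run : Int := if some L == st.2.2 then st.2.1 + 1 else 1
          let best : Int := if run > st.1 then run else st.1
          (best, run, some L)) ((0, 0, none) : Int × Int × Option Int)).1 := rfl
  have hperm : (PySem.List.sorted (strArr.map (fun s => PySem.Str.len s)) (fun x => x) false).Perm
      (strArr.map (fun s => PySem.Str.len s)) :=
    PySem.List.sorted_perm _ (fun x => x) false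
  have hp : (PySem.List.sorted (strArr.map (fun s => PySem.Str.len s)) (fun x => x) false).Pairwise (· ≤ ·) := by
    have := PySem.List.sorted_pairwise (strArr.map (fun s => PySem.Str.len s)) (fun x => x)
    simpa using this
  rw [hdef, pvRun_inv _ hp]
  exact congrArg (fun n : Nat => (n : Int)) (pvM_perm hperm)

-- ===== VERDICT (by name: the statement is the Claim_ definition above) =====
theorem solution_spec : Claim_equal_solution := by
  intro strArr _ hpre
  unfold Spec_solution
  rw [solution_eq_pvM strArr hpre, solution_alt_eq_pvM strArr]
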